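-- pv_equiv track=rewrite | github.com/leskin-in/mipt-bioalgo | hw4/_sequence_peptide_ideal.py | _is_peptide_cyclospectrum_equal_to_spectrum
-- ===== SOURCE A (Python) =====
-- def _is_peptide_cyclospectrum_equal_to_spectrum(peptide: list, spectrum: set) -> bool:
--     """
--     Check if the given peptide consistent with the given spectrum
--     """
--     cyclospectrum = set()
--     for cycle_len in range(1, len(peptide)):
--         peptide_extended = peptide + peptide[:(cycle_len - 1)]
--         for cycle_start_pos in range(len(peptide)):
--             cyclospectrum.add(_peptide_mass(peptide_extended[cycle_start_pos:(cycle_start_pos + cycle_len)]))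
--
--     cyclospectrum.add(0)
--     cyclospectrum.add(_peptide_mass(peptide))
--
--     return cyclospectrum == spectrum
--
-- def _peptide_mass(peptide: list):
--     """
--     Calculate peptide mass
--     """
--     return sum(peptide)
-- ===== SOURCE B (Python) =====
-- def _is_peptide_cyclospectrum_equal_to_spectrum(peptide: list, spectrum: set) -> bool:
--     """
--     Check if the given peptide consistent with the given spectrum,
--     using prefix sums over the doubled peptide for O(1) subpeptide masses.
--     """
--     n = len(peptide)
--     prefix = [0]
--     run = 0
--     for x in peptide + peptide:
--         run += x
--         prefix.append(run)
--     cyclospectrum = {0, prefix[n]}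
--     for start in range(n):
--         for length in range(1, n):
--             cyclospectrum.add(prefix[start + length] - prefix[start])
--     return cyclospectrum == spectrum
-- ===== Notes on version B (the rewrite author's own statement) =====
-- stated objective: faster
-- what changed: B computes all cyclic-subpeptide masses as O(1) differences of a prefix-sum array over the doubled peptide instead of A's slicing the extended peptide and re-summing each slice.
import Mathlib
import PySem

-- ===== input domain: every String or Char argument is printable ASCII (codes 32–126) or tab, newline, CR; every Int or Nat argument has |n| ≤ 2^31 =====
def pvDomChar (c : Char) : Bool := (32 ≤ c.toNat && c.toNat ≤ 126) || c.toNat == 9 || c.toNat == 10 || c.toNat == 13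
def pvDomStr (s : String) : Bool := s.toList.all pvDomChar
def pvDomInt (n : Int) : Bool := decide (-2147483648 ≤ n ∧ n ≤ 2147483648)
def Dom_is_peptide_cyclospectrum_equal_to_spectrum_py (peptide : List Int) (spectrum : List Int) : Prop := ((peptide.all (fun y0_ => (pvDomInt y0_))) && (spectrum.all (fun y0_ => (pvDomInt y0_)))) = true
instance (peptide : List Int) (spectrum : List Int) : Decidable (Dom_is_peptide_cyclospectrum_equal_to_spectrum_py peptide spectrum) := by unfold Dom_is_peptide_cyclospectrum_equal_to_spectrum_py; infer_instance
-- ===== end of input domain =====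

-- B replaces A's cubic slice-and-sum cyclospectrum construction by prefix sums over the
-- doubled peptide (O(1) per subpeptide mass): objective = faster (asymptotic).


-- ===== PORT A =====
-- _peptide_mass: sum(peptide)
def pvPeptideMass (peptide : List Int) : Int := peptide.sum

def is_peptide_cyclospectrum_equal_to_spectrum_py (peptide : List Int) (spectrum : List Int) : Bool :=
  let cyclospectrum : PySem.Set Int :=
    (PySem.List.pyRange 1 (peptide.length : Int) 1).foldl (fun cyclo cycle_len =>
      let peptide_extended := peptide ++ PySem.List.slice peptide none (some (cycle_len - 1))
      (PySem.List.pyRange 0 (peptide.length : Int) 1).foldl (fun cyclo cycle_start_pos =>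
        PySem.Set.add cyclo (pvPeptideMass
          (PySem.List.slice peptide_extended (some cycle_start_pos) (some (cycle_start_pos + cycle_len)))))
        cyclo)
      PySem.Set.empty
  let cyclospectrum := PySem.Set.add cyclospectrum 0
  let cyclospectrum := PySem.Set.add cyclospectrum (pvPeptideMass peptide)
  PySem.Set.equal cyclospectrum spectrum

-- ===== PORT B =====
def is_peptide_cyclospectrum_equal_to_spectrum_py_alt (peptide : List Int) (spectrum : List Int) : Bool :=
  let n : Int := (peptide.length : Int)
  -- pref = [0]; run = 0; for x in peptide + peptide: run += x; pref.append(run)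
  let st := (peptide ++ peptide).foldl
    (fun (pr : List Int × Int) x => (pr.1 ++ [pr.2 + x], pr.2 + x)) ([0], 0)
  let pref := st.1
  -- cyclospectrum = {0, pref[n]}
  let cyclospectrum : PySem.Set Int :=
    PySem.Set.add (PySem.Set.add PySem.Set.empty 0) (PySem.List.pyGetD pref n 0)
  let cyclospectrum :=
    (PySem.List.pyRange 0 n 1).foldl (fun cyclo start =>
      (PySem.List.pyRange 1 n 1).foldl (fun cyclo length =>
        PySem.Set.add cyclo
          (PySem.List.pyGetD pref (start + length) 0 - PySem.List.pyGetD pref start 0))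
        cyclo)
      cyclospectrum
  PySem.Set.equal cyclospectrum spectrum

-- ===== PRECONDITION & SPEC =====
def Spec_is_peptide_cyclospectrum_equal_to_spectrum_py (peptide : List Int) (spectrum : List Int) (out : Bool) : Prop := out = is_peptide_cyclospectrum_equal_to_spectrum_py_alt peptide spectrum
instance (peptide : List Int) (spectrum : List Int) (out : Bool) : Decidable (Spec_is_peptide_cyclospectrum_equal_to_spectrum_py peptide spectrum out) := by unfold Spec_is_peptide_cyclospectrum_equal_to_spectrum_py; infer_instance

-- ===== CLAIM (what is proved, stated in full; the proofs are below) =====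
def Claim_equal_is_peptide_cyclospectrum_equal_to_spectrum_py : Prop := ∀ (peptide : List Int) (spectrum : List Int), Dom_is_peptide_cyclospectrum_equal_to_spectrum_py peptide spectrum → Spec_is_peptide_cyclospectrum_equal_to_spectrum_py peptide spectrum (is_peptide_cyclospectrum_equal_to_spectrum_py peptide spectrum)

-- ===== LEMMAS AND PROOFS =====

-- generic membership characterization of a foldl whose body's membership is known
lemma pv_mem_foldl (L : List Int) (g : PySem.Set Int → Int → PySem.Set Int)
    (P : Int → Int → Prop)
    (h : ∀ c i x, x ∈ g c i ↔ x ∈ c ∨ P i x) :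
    ∀ (c : PySem.Set Int) (x : Int), x ∈ L.foldl g c ↔ x ∈ c ∨ ∃ i ∈ L, P i x := by
  induction L with
  | nil => simp
  | cons a L ih =>
    intro c x
    simp only [List.foldl_cons, ih, h, List.mem_cons]
    constructor
    · rintro ((hc | hp) | ⟨i, hi, hp⟩)
      · exact Or.inl hc
      · exact Or.inr ⟨a, Or.inl rfl, hp⟩
      · exact Or.inr ⟨i, Or.inr hi, hp⟩
    · rintro (hc | ⟨i, (rfl | hi), hp⟩)
      · exact Or.inl (Or.inl hc)
      · exact Or.inl (Or.inr hp)
      · exact Or.inr ⟨i, hi, hp⟩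

-- the prefix-sum loop of B computes partial sums
lemma pv_pref_spec (l : List Int) :
    ∀ (acc : List Int) (r : Int),
      l.foldl (fun (pr : List Int × Int) x => (pr.1 ++ [pr.2 + x], pr.2 + x)) (acc, r)
        = (acc ++ (List.range l.length).map (fun i => r + (l.take (i + 1)).sum), r + l.sum) := by
  induction l with
  | nil => simp
  | cons a l ih =>
    intro acc r
    simp [List.range_succ_eq_map, Function.comp_def, add_assoc, ih]

-- pref[i] = sum of the first i elements of the doubled peptide
lemma pv_pref_get (dbl : List Int) (i : Nat) (hi : i ≤ dbl.length) :
    PySem.List.pyGetD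
      ((dbl.foldl (fun (pr : List Int × Int) x => (pr.1 ++ [pr.2 + x], pr.2 + x)) ([0], 0)).1)
      (i : Int) 0 = (dbl.take i).sum := by
  rw [pv_pref_spec]
  have hlist : ([(0 : Int)] ++ (List.range dbl.length).map (fun i => 0 + (dbl.take (i + 1)).sum))
      = (List.range (dbl.length + 1)).map (fun i => (dbl.take i).sum) := by
    simp [List.range_succ_eq_map, Function.comp_def]
  rw [PySem.List.pyGetD_natCast, hlist, List.getD_eq_getElem _ _ (by simp; omega)]
  simp

-- the slice mass A computes equals B's prefix-sum difference on the doubled peptide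
lemma pv_mass_eq (peptide : List Int) (cl s : Int)
    (hcl1 : 1 ≤ cl) (hcln : cl < (peptide.length : Int))
    (hs0 : 0 ≤ s) (hsn : s < (peptide.length : Int)) :
    pvPeptideMass (PySem.List.slice (peptide ++ PySem.List.slice peptide none (some (cl - 1)))
        (some s) (some (s + cl)))
      = PySem.List.pyGetD
          (((peptide ++ peptide).foldl
            (fun (pr : List Int × Int) x => (pr.1 ++ [pr.2 + x], pr.2 + x)) ([0], 0)).1) (s + cl) 0
        - PySem.List.pyGetD
          (((peptide ++ peptide).foldl
            (fun (pr : List Int × Int) x => (pr.1 ++ [pr.2 + x], pr.2 + x)) ([0], 0)).1) s 0 := by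
  set n := peptide.length with hn
  obtain ⟨c, hc⟩ : ∃ c : Nat, cl = (c : Int) := ⟨cl.toNat, by omega⟩
  obtain ⟨a, ha⟩ : ∃ a : Nat, s = (a : Int) := ⟨s.toNat, by omega⟩
  subst hc ha
  have hc1 : 1 ≤ c := by exact_mod_cast hcl1
  have hcn : c < n := by exact_mod_cast hcln
  have han : a < n := by exact_mod_cast hsn
  have hlen : (peptide ++ peptide).length = n + n := by simp [hn]
  -- rewrite the two pref lookups as partial sums of the doubled peptide
  have hcast : ((a : Int) + (c : Int)) = ((a + c : Nat) : Int) := by push_cast; ring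
  rw [hcast, pv_pref_get _ (a + c) (by omega), pv_pref_get _ a (by omega)]
  -- split the longer partial sum
  have hsplit : (peptide ++ peptide).take (a + c) =
      (peptide ++ peptide).take a ++ (((peptide ++ peptide).drop a).take c) := by
    rw [← List.take_add]
  -- A's slices
  have hslice1 : PySem.List.slice peptide none (some ((c : Int) - 1)) = peptide.take (c - 1) := by
    have h1 : ((c : Int) - 1) = ((c - 1 : Nat) : Int) := by omega
    rw [h1, PySem.List.slice_to_natCast]
  have hslice2 : PySem.List.slice (peptide ++ peptide.take (c - 1))
      (some (a : Int)) (some ((a + c : Nat) : Int)) =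
      ((peptide ++ peptide.take (c - 1)).drop a).take c := by
    rw [PySem.List.slice_natCast]
    congr 1
    omega
  -- the extended peptide is a prefix of the doubled peptide, long enough for the window
  have hext : peptide ++ peptide.take (c - 1) = (peptide ++ peptide).take (n + (c - 1)) := by
    rw [List.take_append, List.take_of_length_le (i := n + (c - 1)) (l := peptide) (by omega)]
    have hnn : n + (c - 1) - peptide.length = c - 1 := by omega
    rw [hnn]
  have hwin : ((peptide ++ peptide.take (c - 1)).drop a).take c =
      (((peptide ++ peptide)).drop a).take c := by
    rw [hext, List.drop_take, List.take_take]
    congr 1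
    omega
  rw [hsplit, List.sum_append, hslice1, hslice2, hwin, pvPeptideMass]
  ring

-- pref[n] is the mass of the whole peptide
lemma pv_pref_total (peptide : List Int) :
    PySem.List.pyGetD
      (((peptide ++ peptide).foldl
        (fun (pr : List Int × Int) x => (pr.1 ++ [pr.2 + x], pr.2 + x)) ([0], 0)).1)
      ((peptide.length : Nat) : Int) 0 = peptide.sum := by
  rw [pv_pref_get _ peptide.length (by simp)]
  simp

-- equality with a third set only depends on membership
lemma pv_equal_congr (s t u : PySem.Set Int) (h : ∀ x, x ∈ s ↔ x ∈ t) :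
    PySem.Set.equal s u = PySem.Set.equal t u := by
  rw [Bool.eq_iff_iff, PySem.Set.equal_iff, PySem.Set.equal_iff]
  constructor
  · intro hh x; exact (h x).symm.trans (hh x)
  · intro hh x; exact (h x).trans (hh x)

-- ===== VERDICT (by name: the statement is the Claim_ definition above) =====
theorem is_peptide_cyclospectrum_equal_to_spectrum_py_spec : Claim_equal_is_peptide_cyclospectrum_equal_to_spectrum_py := by
  intro peptide spectrum _
  unfold Spec_is_peptide_cyclospectrum_equal_to_spectrum_py
  unfold is_peptide_cyclospectrum_equal_to_spectrum_py is_peptide_cyclospectrum_equal_to_spectrum_py_alt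
  apply pv_equal_congr
  intro x
  rw [PySem.Set.mem_add, PySem.Set.mem_add,
    pv_mem_foldl _ _
      (fun cl x => ∃ s ∈ PySem.List.pyRange 0 (peptide.length : Int) 1,
        x = pvPeptideMass (PySem.List.slice (peptide ++ PySem.List.slice peptide none (some (cl - 1)))
          (some s) (some (s + cl))))
      (fun c i x => by rw [PySem.Set.mem_foldl_add]),
    pv_mem_foldl _ _
      (fun st x => ∃ cl ∈ PySem.List.pyRange 1 (peptide.length : Int) 1,
        x = PySem.List.pyGetD
            (((peptide ++ peptide).foldl
              (fun (pr : List Int × Int) x => (pr.1 ++ [pr.2 + x], pr.2 + x)) ([0], 0)).1) (st + cl) 0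
          - PySem.List.pyGetD
            (((peptide ++ peptide).foldl
              (fun (pr : List Int × Int) x => (pr.1 ++ [pr.2 + x], pr.2 + x)) ([0], 0)).1) st 0)
      (fun c i x => by rw [PySem.Set.mem_foldl_add]),
    PySem.Set.mem_add, PySem.Set.mem_add, pv_pref_total]
  have key : ∀ cl ∈ PySem.List.pyRange 1 (peptide.length : Int) 1,
      ∀ s ∈ PySem.List.pyRange 0 (peptide.length : Int) 1,
      pvPeptideMass (PySem.List.slice (peptide ++ PySem.List.slice peptide none (some (cl - 1)))
          (some s) (some (s + cl)))
        = PySem.List.pyGetD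
            (((peptide ++ peptide).foldl
              (fun (pr : List Int × Int) x => (pr.1 ++ [pr.2 + x], pr.2 + x)) ([0], 0)).1) (s + cl) 0
          - PySem.List.pyGetD
            (((peptide ++ peptide).foldl
              (fun (pr : List Int × Int) x => (pr.1 ++ [pr.2 + x], pr.2 + x)) ([0], 0)).1) s 0 := by
    intro cl hcl s hs
    rw [PySem.List.mem_pyRange_one] at hcl hs
    exact pv_mass_eq peptide cl s hcl.1 hcl.2 hs.1 hs.2
  simp only [PySem.Set.empty, List.not_mem_nil, false_or]
  constructor
  · rintro ((⟨cl, hcl, s, hs, rfl⟩ | rfl) | rfl)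
    · exact Or.inr ⟨s, hs, cl, hcl, key cl hcl s hs⟩
    · exact Or.inl (Or.inl rfl)
    · exact Or.inl (Or.inr rfl)
  · rintro ((rfl | rfl) | ⟨s, hs, cl, hcl, rfl⟩)
    · exact Or.inl (Or.inr rfl)
    · exact Or.inr rfl
    · exact Or.inl (Or.inl ⟨cl, hcl, s, hs, (key cl hcl s hs).symm⟩)
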